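-- pv_equiv track=rewrite | github.com/liuchengyiu/power_control_test | power_control_test/test/hardware/autoJc/jc.py | createFrame
-- ===== SOURCE A (Python) =====
-- def crc16_a001(data) -> int:
--     crc16 = 0xFFFF
--     for d in data:
--         crc16 = crc16 ^ d
--         for j in range(0, 8):
--             if (crc16 & 0x01) > 0:
--                 crc16 = (crc16 >> 1) ^ 0xa001
--                 continue
--             crc16 = crc16 >> 1
--     return crc16
--
-- def createFrame(head, command, data, end) -> list:
--     length = 7 + len(data)
--     frame = [head, length & 0xFF, (length & 0xFF00) >> 8, command]
--     for d in data:
--         frame.append(d)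
--     crc = crc16_a001(frame)
--     frame.append(crc & 0xFF)
--     frame.append((crc & 0xFF00) >> 8)
--     frame.append(end)
--     return frame
-- ===== SOURCE B (Python) =====
-- # Table-driven CRC16 (reflected poly 0xA001) instead of bit-by-bit; frame built by concatenation.
-- def _crc16_table():
--     table = []
--     for i in range(256):
--         crc = i
--         for _ in range(8):
--             if crc & 1:
--                 crc = (crc >> 1) ^ 0xA001
--             else:
--                 crc >>= 1
--         table.append(crc)
--     return table
--
-- _TABLE = _crc16_table()
--
-- def createFrame(head, command, data, end) -> list:
--     length = 7 + len(data)
--     frame = [head, length & 0xFF, (length & 0xFF00) >> 8, command] + list(data)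
--     crc = 0xFFFF
--     for b in frame:
--         x = crc ^ b
--         crc = (x >> 8) ^ _TABLE[x & 0xFF]
--     return frame + [crc & 0xFF, (crc & 0xFF00) >> 8, end]
-- ===== Notes on version B (the rewrite author's own statement) =====
-- stated objective: faster
-- what changed: Replaces the per-byte 8-iteration bit-by-bit CRC16 loop with a precomputed 256-entry table-driven CRC (one lookup per byte, xoring the full-width shifted remainder so out-of-range byte values reduce identically), and builds the frame by list concatenation instead of an append loop.
import Mathlib
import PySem

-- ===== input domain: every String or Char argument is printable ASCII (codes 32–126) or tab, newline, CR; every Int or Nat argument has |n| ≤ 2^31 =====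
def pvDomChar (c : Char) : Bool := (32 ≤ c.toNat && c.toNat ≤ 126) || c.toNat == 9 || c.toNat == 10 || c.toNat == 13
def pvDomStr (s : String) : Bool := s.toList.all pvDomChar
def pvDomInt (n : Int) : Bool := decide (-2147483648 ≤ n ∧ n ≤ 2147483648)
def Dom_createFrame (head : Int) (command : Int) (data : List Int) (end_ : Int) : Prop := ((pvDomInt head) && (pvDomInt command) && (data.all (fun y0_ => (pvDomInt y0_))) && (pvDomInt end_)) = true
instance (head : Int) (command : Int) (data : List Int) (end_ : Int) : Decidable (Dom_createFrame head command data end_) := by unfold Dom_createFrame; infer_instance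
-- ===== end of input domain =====

-- B replaces A's per-byte bit-by-bit CRC16 loop with a precomputed 256-entry table-driven CRC and builds the frame by concatenation (objective: faster by a constant factor).

-- ===== PORT A =====
def crc16_a001 (data : List Int) : Int :=
  data.foldl
    (fun crc16 d =>
      (List.range 8).foldl
        (fun c _ =>
          if PySem.Int.band c 1 > 0 then PySem.Int.bxor (c >>> (1:Nat)) 0xa001 else c >>> (1:Nat))
        (PySem.Int.bxor crc16 d))
    0xFFFF

def createFrame (head : Int) (command : Int) (data : List Int) (end_ : Int) : List Int :=
  let length : Int := 7 + PySem.List.len data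
  let frame : List Int :=
    [head, PySem.Int.band length 0xFF, (PySem.Int.band length 0xFF00) >>> (8:Nat), command]
  let frame := data.foldl (fun f d => f ++ [d]) frame
  let crc := crc16_a001 frame
  let frame := frame ++ [PySem.Int.band crc 0xFF]
  let frame := frame ++ [(PySem.Int.band crc 0xFF00) >>> (8:Nat)]
  let frame := frame ++ [end_]
  frame

-- ===== PORT B =====
def crcRound (c : Int) : Int :=
  if PySem.Int.band c 1 ≠ 0 then PySem.Int.bxor (c >>> (1:Nat)) 0xA001 else c >>> (1:Nat)

def crcTable : List Int :=
  (List.range 256).map (fun i : Nat => (List.range 8).foldl (fun c _ => crcRound c) (i : Int))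

-- _TABLE[x & 0xFF]: the index is always in [0, 256) = range of the table, so Python never raises here; the default 0 is unreachable.
def crcStep (crc b : Int) : Int :=
  let x := PySem.Int.bxor crc b
  PySem.Int.bxor (x >>> (8:Nat)) (PySem.List.pyGetD crcTable (PySem.Int.band x 0xFF) 0)

def createFrame_alt (head : Int) (command : Int) (data : List Int) (end_ : Int) : List Int :=
  let length : Int := 7 + PySem.List.len data
  let frame : List Int :=
    [head, PySem.Int.band length 0xFF, (PySem.Int.band length 0xFF00) >>> (8:Nat), command] ++ data
  let crc := frame.foldl crcStep 0xFFFF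
  frame ++ [PySem.Int.band crc 0xFF, (PySem.Int.band crc 0xFF00) >>> (8:Nat), end_]

-- ===== PRECONDITION & SPEC =====
def Spec_createFrame (head : Int) (command : Int) (data : List Int) (end_ : Int) (out : List Int) : Prop := out = createFrame_alt head command data end_
instance (head : Int) (command : Int) (data : List Int) (end_ : Int) (out : List Int) : Decidable (Spec_createFrame head command data end_ out) := by unfold Spec_createFrame; infer_instance

-- ===== CLAIM (what is proved, stated in full; the proofs are below) =====
def Claim_equal_createFrame : Prop := ∀ (head : Int) (command : Int) (data : List Int) (end_ : Int), Dom_createFrame head command data end_ → Spec_createFrame head command data end_ (createFrame head command data end_)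

-- ===== LEMMAS AND PROOFS =====
def enc (s : Bool) (m : Nat) : Int := if s then -(m : Int) - 1 else (m : Int)

theorem bxor_enc (s t : Bool) (m k : Nat) :
    PySem.Int.bxor (enc s m) (enc t k) = enc (s != t) (m ^^^ k) := by
  cases s <;> cases t
  · show PySem.Int.bxor (m:Int) (k:Int) = ((m ^^^ k : Nat) : Int)
    simp
  · show PySem.Int.bxor (m:Int) (-(k:Int) - 1) = -((m ^^^ k : Nat) : Int) - 1
    rw [PySem.Int.bxor.eq_1, if_pos (by omega), if_neg (by omega)]
    norm_num
  · show PySem.Int.bxor (-(m:Int) - 1) (k:Int) = -((m ^^^ k : Nat) : Int) - 1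
    rw [PySem.Int.bxor.eq_1, if_neg (by omega), if_pos (by omega)]
    norm_num
  · show PySem.Int.bxor (-(m:Int) - 1) (-(k:Int) - 1) = ((m ^^^ k : Nat) : Int)
    rw [PySem.Int.bxor.eq_1, if_neg (by omega), if_neg (by omega)]
    norm_num

theorem shiftRight_enc (s : Bool) (m n : Nat) : (enc s m) >>> n = enc s (m >>> n) := by
  cases s
  · show (m:Int) >>> n = ((m >>> n : Nat) : Int)
    simp [Int.natCast_shiftRight]
  · show (-(m:Int) - 1) >>> n = -((m >>> n : Nat) : Int) - 1
    have h1 : -(m:Int) - 1 = Int.negSucc m := by simp [Int.negSucc_eq]; ring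
    have h2 : -((m >>> n : Nat):Int) - 1 = Int.negSucc (m >>> n) := by simp [Int.negSucc_eq]; ring
    rw [h1, h2, Int.negSucc_shiftRight]

theorem shiftLeft_enc (s : Bool) (m n : Nat) :
    (enc s m) <<< n = enc s ((m <<< n) + (if s then 2 ^ n - 1 else 0)) := by
  cases s
  · show (m:Int) <<< n = ((m <<< n + 0 : Nat) : Int)
    simp [Int.natCast_shiftLeft]
  · show (-(m:Int) - 1) <<< n = -((m <<< n + (2 ^ n - 1) : Nat) : Int) - 1
    rw [Int.shiftLeft_eq]
    have h1 : (1:Nat) ≤ 2 ^ n := Nat.one_le_two_pow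
    push_cast [Nat.shiftLeft_eq, h1]
    ring

theorem band255_enc (s : Bool) (m : Nat) :
    PySem.Int.band (enc s m) 0xFF = enc false (if s then 255 - m % 256 else m % 256) := by
  have h : ∀ k : Nat, k &&& 255 = k % 256 := fun k => Nat.and_two_pow_sub_one_eq_mod k 8
  cases s
  · show PySem.Int.band (m:Int) 0xFF = ((m % 256 : Nat) : Int)
    rw [PySem.Int.band.eq_1, if_pos (by omega), if_pos (by omega)]
    norm_num [show (255:Int).toNat = 255 from rfl, h]
  · show PySem.Int.band (-(m:Int) - 1) 0xFF = ((255 - m % 256 : Nat) : Int)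
    rw [PySem.Int.band.eq_1, if_neg (by omega), if_pos (by omega)]
    norm_num [show (255:Int).toNat = 255 from rfl, Nat.and_comm, h]

theorem band1_enc (s : Bool) (m : Nat) :
    PySem.Int.band (enc s m) 1 = enc false (if s then 1 - m % 2 else m % 2) := by
  have h : ∀ k : Nat, k &&& 1 = k % 2 := fun k => Nat.and_two_pow_sub_one_eq_mod k 1
  cases s
  · show PySem.Int.band (m:Int) 1 = ((m % 2 : Nat) : Int)
    rw [PySem.Int.band.eq_1, if_pos (by omega), if_pos (by omega)]
    norm_num [show (1:Int).toNat = 1 from rfl, h]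
  · show PySem.Int.band (-(m:Int) - 1) 1 = ((1 - m % 2 : Nat) : Int)
    rw [PySem.Int.band.eq_1, if_neg (by omega), if_pos (by omega)]
    norm_num [show (1:Int).toNat = 1 from rfl, Nat.and_comm, h]

def roundA (c : Int) : Int :=
  if PySem.Int.band c 1 > 0 then PySem.Int.bxor (c >>> (1:Nat)) 0xa001 else c >>> (1:Nat)

theorem roundA_enc (s : Bool) (m : Nat) :
    roundA (enc s m) =
      enc s ((m >>> 1) ^^^ (if (if s then 1 - m % 2 else m % 2) = 1 then 40961 else 0)) := by
  unfold roundA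
  rw [band1_enc, shiftRight_enc]
  rcases eq_or_ne (if s then 1 - m % 2 else m % 2) 1 with hb | hb
  · rw [if_pos (by rw [hb]; show (0:Int) < ((1:Nat):Int); norm_num), if_pos hb,
      show (0xa001 : Int) = enc false 40961 from rfl, bxor_enc]
    cases s <;> rfl
  · have h01 : (if s then 1 - m % 2 else m % 2) = 0 := by
      have := Nat.mod_two_eq_zero_or_one m; cases s <;> simp_all <;> omega
    rw [if_neg (by rw [h01]; show ¬ (0:Int) < ((0:Nat):Int); norm_num), if_neg hb]
    simp

theorem roundA_bxor (a b : Int) :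
    roundA (PySem.Int.bxor a b) = PySem.Int.bxor (roundA a) (roundA b) := by
  obtain ⟨s, m, rfl⟩ : ∃ s m, a = enc s m := by
    rcases a with m | m
    · exact ⟨false, m, rfl⟩
    · exact ⟨true, m, by simp [enc, Int.negSucc_eq]; ring⟩
  obtain ⟨t, k, rfl⟩ : ∃ t k, b = enc t k := by
    rcases b with kk | kk
    · exact ⟨false, kk, rfl⟩
    · exact ⟨true, kk, by simp [enc, Int.negSucc_eq]; ring⟩
  rw [bxor_enc, roundA_enc, roundA_enc, roundA_enc, bxor_enc]
  congr 1
  rw [Nat.shiftRight_xor_distrib]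
  have hm := Nat.mod_two_eq_zero_or_one m
  have hk := Nat.mod_two_eq_zero_or_one k
  have hmk : (m ^^^ k) % 2 = (m + k) % 2 := Nat.xor_mod_two_eq
  cases s <;> cases t <;> rcases hm with hm | hm <;> rcases hk with hk | hk <;>
    simp [hmk, Nat.add_mod, hm, hk] <;>
    simp [Nat.xor_assoc, Nat.xor_comm, Nat.xor_left_comm, Nat.xor_self, Nat.zero_xor]

def R (n : Nat) (x : Int) : Int := roundA^[n] x

theorem foldl_range_roundA (n : Nat) (x : Int) :
    (List.range n).foldl (fun c _ => roundA c) x = R n x := by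
  induction n generalizing x with
  | zero => rfl
  | succ k ih =>
      rw [List.range_succ, List.foldl_append, ih, R, R, Function.iterate_succ_apply']
      rfl

theorem R_bxor (n : Nat) (a b : Int) :
    R n (PySem.Int.bxor a b) = PySem.Int.bxor (R n a) (R n b) := by
  induction n generalizing a b with
  | zero => rfl
  | succ k ih =>
      rw [R, R, R, Function.iterate_succ_apply, Function.iterate_succ_apply,
        Function.iterate_succ_apply, roundA_bxor]
      exact ih _ _

theorem roundA_shiftLeft (y : Int) (n : Nat) : roundA (y <<< (n + 1)) = y <<< n := by
  obtain ⟨s, m, rfl⟩ : ∃ s m, y = enc s m := by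
    rcases y with m | m
    · exact ⟨false, m, rfl⟩
    · exact ⟨true, m, by simp [enc, Int.negSucc_eq]; ring⟩
  rw [shiftLeft_enc, shiftLeft_enc, roundA_enc]
  have h1 : (1:Nat) ≤ 2 ^ (n+1) := Nat.one_le_two_pow
  have e1 : m <<< (n + 1) = (m <<< n) * 2 := by
    simp [Nat.shiftLeft_eq, Nat.pow_succ]; ring
  have e2 : (2:Nat) ^ (n + 1) = 2 ^ n * 2 := Nat.pow_succ 2 n
  have h1' : (1:Nat) ≤ 2 ^ n := Nat.one_le_two_pow
  have h2 : (m <<< (n + 1) + (if s then 2 ^ (n+1) - 1 else 0)) % 2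
      = if s then 1 else 0 := by
    cases s <;> simp [e1, e2] <;> omega
  have h3 : (m <<< (n + 1) + (if s then 2 ^ (n+1) - 1 else 0)) >>> 1
      = m <<< n + (if s then 2 ^ n - 1 else 0) := by
    rw [Nat.shiftRight_one]
    cases s <;> simp [e1, e2] <;> omega
  cases s
  · simp at h2 h3
    simp [h2, h3]
  · simp at h2 h3
    simp [h2, h3]

theorem R_shiftLeft (n : Nat) (y : Int) : R n (y <<< n) = y := by
  induction n generalizing y with
  | zero => simp [R]
  | succ k ih =>
      rw [R, Function.iterate_succ_apply, show roundA^[k] = R k from rfl,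
        roundA_shiftLeft, ih]

theorem nat_recomb (m : Nat) : ((m >>> 8) <<< 8) ^^^ (m % 256) = m := by
  apply Nat.eq_of_testBit_eq
  intro j
  rw [Nat.testBit_xor, Nat.testBit_shiftLeft,
    show (256:Nat) = 2 ^ 8 from rfl, Nat.testBit_mod_two_pow, Nat.testBit_shiftRight]
  rcases Nat.lt_or_ge j 8 with h | h
  · simp [h, Nat.not_le_of_lt h]
  · simp [h, Nat.not_lt_of_le h, Nat.add_sub_cancel' h]

set_option maxRecDepth 8192 in
theorem xor_255 : ∀ r < 256, 255 ^^^ r = 255 - r := by decide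

theorem disj_add (X : Nat) : (X <<< 8) ^^^ 255 = (X <<< 8) + 255 := by
  apply Nat.eq_of_testBit_eq
  intro j
  rw [Nat.shiftLeft_eq, Nat.mul_comm,
    Nat.testBit_two_pow_mul_add X (b := 255) (i := 8) (by norm_num) j,
    Nat.testBit_xor, Nat.testBit_two_pow_mul]
  have h255 : Nat.testBit 255 j = decide (j < 8) := by
    rw [show (255:Nat) = 2 ^ 8 - 1 from rfl, Nat.testBit_two_pow_sub_one]
  rcases Nat.lt_or_ge j 8 with h | h
  · simp [h255, h, Nat.not_le_of_lt h]
  · simp [h255, h, Nat.not_lt_of_le h]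

theorem exists_enc (x : Int) : ∃ s m, x = enc s m := by
  rcases x with m | m
  · exact ⟨false, m, rfl⟩
  · exact ⟨true, m, by simp [enc, Int.negSucc_eq]; ring⟩

theorem decomp (x : Int) :
    x = PySem.Int.bxor ((x >>> (8:Nat)) <<< (8:Nat)) (PySem.Int.band x 0xFF) := by
  obtain ⟨s, m, rfl⟩ := exists_enc x
  rw [shiftRight_enc, shiftLeft_enc, band255_enc, bxor_enc]
  cases s
  · simp only [Bool.bne_false]
    rw [show (if false = true then (255:Nat) - m % 256 else m % 256) = m % 256 from rfl,
      show (if false = true then 2^8-1 else 0) = 0 from rfl, Nat.add_zero,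
      show (8:Nat) = 8 from rfl]
    rw [show ((m >>> 8) <<< 8) ^^^ (m % 256) = m from nat_recomb m]
  · simp only [Bool.bne_false]
    congr 1
    norm_num
    rw [show (255:Nat) - m % 256 = 255 ^^^ (m % 256) from (xor_255 _ (by omega)).symm,
      ← disj_add, Nat.xor_assoc, Nat.xor_xor_cancel_left, nat_recomb]

theorem band255_lt (x : Int) : ∃ r : Nat, r < 256 ∧ PySem.Int.band x 0xFF = (r : Int) := by
  obtain ⟨s, m, rfl⟩ := exists_enc x
  rw [band255_enc]
  cases s
  · exact ⟨m % 256, by omega, rfl⟩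
  · exact ⟨255 - m % 256, by omega, rfl⟩

theorem crcRound_eq (c : Int) : crcRound c = roundA c := by
  have h : 0 ≤ PySem.Int.band c 1 := by
    rw [PySem.Int.band_comm]; exact PySem.Int.band_nonneg_of_nonneg_left _ (by omega)
  unfold crcRound roundA
  by_cases hc : PySem.Int.band c 1 = 0
  · rw [if_neg (by simp [hc]), if_neg (by omega)]
  · rw [if_pos hc, if_pos (by omega)]

theorem table_lookup (r : Nat) (h : r < 256) :
    PySem.List.pyGetD crcTable ((r : Nat) : Int) 0 = R 8 (r : Int) := by
  rw [PySem.List.pyGetD_natCast, crcTable, PySem.List.getD_map_range _ _ _ _ h]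
  simp only [crcRound_eq]
  exact foldl_range_roundA 8 _

theorem key (x : Int) :
    R 8 x = PySem.Int.bxor (x >>> (8:Nat)) (PySem.List.pyGetD crcTable (PySem.Int.band x 0xFF) 0) := by
  obtain ⟨r, hr, hband⟩ := band255_lt x
  conv_lhs => rw [decomp x]
  rw [R_bxor, R_shiftLeft, hband, table_lookup r hr]

theorem step_eq (crc d : Int) :
    (List.range 8).foldl
      (fun c _ => if PySem.Int.band c 1 > 0 then PySem.Int.bxor (c >>> (1:Nat)) 0xa001 else c >>> (1:Nat))
      (PySem.Int.bxor crc d) = crcStep crc d := by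
  have he : (fun (c : Int) (_ : Nat) => if PySem.Int.band c 1 > 0 then PySem.Int.bxor (c >>> (1:Nat)) 0xa001 else c >>> (1:Nat))
      = fun (c : Int) (_ : Nat) => roundA c := rfl
  rw [he, foldl_range_roundA, key]
  rfl

theorem crc_eq (l : List Int) : crc16_a001 l = l.foldl crcStep 0xFFFF := by
  unfold crc16_a001
  induction l using List.reverseRecOn with
  | nil => rfl
  | append_singleton xs x ih =>
      rw [List.foldl_append, List.foldl_append, ih, List.foldl_cons, List.foldl_nil,
        List.foldl_cons, List.foldl_nil, step_eq]

-- ===== VERDICT (by name: the statement is the Claim_ definition above) =====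
theorem createFrame_spec : Claim_equal_createFrame := by
  intro head command data end_ _
  show createFrame head command data end_ = createFrame_alt head command data end_
  simp only [createFrame, createFrame_alt]
  rw [PySem.List.foldl_append_singleton_eq_self, crc_eq]
  simp [List.append_assoc]
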